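-- pv_equiv track=rewrite | github.com/AABK6/citizen-budget-lab | services/api/clients/eurostat.py | _lin_index
-- ===== SOURCE A (Python) =====
-- from typing import Any, Dict, List, Optional
--
-- def _lin_index(dims: List[str], sizes: List[int], idx_maps: Dict[str, Dict[str, int]], coords: Dict[str, str]) -> Optional[int]:
--     # Compute linearized index for given coords
--     mul = 1
--     idx = 0
--     for pos, d in enumerate(dims[::-1]):
--         d_real = dims[len(dims) - 1 - pos]
--         size = sizes[len(dims) - 1 - pos]
--         if d_real not in coords:
--             return None
--         code = coords[d_real]
--         d_map = idx_maps.get(d_real, {})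
--         if code not in d_map:
--             return None
--         ival = d_map[code]
--         idx += ival * mul
--         mul *= size
--     return idx
-- ===== SOURCE B (Python) =====
-- from typing import Any, Dict, List, Optional
--
-- def _lin_index(dims: List[str], sizes: List[int], idx_maps: Dict[str, Dict[str, int]], coords: Dict[str, str]) -> Optional[int]:
--     # Two stages: collect every dim's integer code first (any missing key aborts),
--     # then fold the codes with the sizes (Horner) in a separate pass.
--     try:
--         vals = [idx_maps[d][coords[d]] for d in dims]
--     except KeyError:
--         return None
--     idx = 0
--     for v, s in zip(vals, sizes):
--         idx = idx * s + v
--     return idx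
-- ===== Notes on version B (the rewrite author's own statement) =====
-- stated objective: idiomatic
-- what changed: B splits the work into two staged passes: a comprehension that resolves every dim's integer code (a KeyError anywhere yields None), then a separate Horner fold of those codes with the sizes, replacing A's single reverse-enumerated pass with a running multiplier and per-step index arithmetic.
import Mathlib
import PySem

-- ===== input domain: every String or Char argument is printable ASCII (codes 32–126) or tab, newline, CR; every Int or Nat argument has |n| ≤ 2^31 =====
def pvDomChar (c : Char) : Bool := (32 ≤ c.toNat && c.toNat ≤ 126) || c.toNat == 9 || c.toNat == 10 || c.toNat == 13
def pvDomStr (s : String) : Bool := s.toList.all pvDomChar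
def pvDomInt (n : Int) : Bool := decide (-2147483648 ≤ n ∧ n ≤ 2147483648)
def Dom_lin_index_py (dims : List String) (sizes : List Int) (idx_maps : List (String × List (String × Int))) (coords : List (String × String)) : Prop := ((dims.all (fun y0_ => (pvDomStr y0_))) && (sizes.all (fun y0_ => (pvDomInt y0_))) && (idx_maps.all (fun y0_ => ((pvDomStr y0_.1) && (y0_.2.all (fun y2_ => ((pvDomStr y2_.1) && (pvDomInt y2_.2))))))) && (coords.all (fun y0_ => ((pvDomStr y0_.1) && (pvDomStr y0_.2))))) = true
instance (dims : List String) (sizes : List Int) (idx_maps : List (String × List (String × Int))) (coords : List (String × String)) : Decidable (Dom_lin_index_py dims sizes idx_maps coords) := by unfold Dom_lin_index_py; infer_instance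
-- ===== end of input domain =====

-- B resolves all dim codes in one staged mapM-style pass and then Horner-folds them with the sizes, replacing A's reverse-enumerated single pass with a running multiplier (idiomatic; same O(n)).


-- ===== PORT A =====
-- the loop body 'for pos, d in enumerate(dims[::-1])' with early 'return None' as structural
-- recursion over the enumerated list; IndexError on sizes/dims is modeled as none (excluded by Pre_)
def linA_go (dims : List String) (sizes : List Int) (idx_maps : List (String × List (String × Int))) (coords : List (String × String)) : List (Int × String) → Int → Int → Option Int
  | [], _mul, idx => some idx
  | (pos, _d) :: rest, mul, idx =>
    match PySem.List.pyGet? dims ((dims.length : Int) - 1 - pos) with   -- d_real = dims[len(dims) - 1 - pos]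
    | none => none
    | some d_real =>
      match PySem.List.pyGet? sizes ((dims.length : Int) - 1 - pos) with  -- size = sizes[len(dims) - 1 - pos]
      | none => none
      | some size =>
        match (PySem.Dict.mk coords).get? d_real with                     -- d_real not in coords → None; code = coords[d_real]
        | none => none
        | some code =>
          match (PySem.Dict.mk ((PySem.Dict.mk idx_maps).getD d_real [])).get? code with  -- d_map = idx_maps.get(d_real, {}); code not in d_map → None
          | none => none
          | some ival => linA_go dims sizes idx_maps coords rest (mul * size) (idx + ival * mul)

-- dims[::-1] is dims.reverse
def lin_index_py (dims : List String) (sizes : List Int) (idx_maps : List (String × List (String × Int))) (coords : List (String × String)) : Option Int :=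
  linA_go dims sizes idx_maps coords (PySem.List.enumerate dims.reverse) 1 0

-- ===== PORT B =====
-- idx_maps[d][coords[d]] evaluated left to right; any KeyError (none) aborts the whole comprehension
def linB_val (idx_maps : List (String × List (String × Int))) (coords : List (String × String)) (d : String) : Option Int :=
  ((PySem.Dict.mk idx_maps).get? d).bind fun m =>
    ((PySem.Dict.mk coords).get? d).bind fun code =>
      (PySem.Dict.mk m).get? code

-- stage 1: the comprehension under try/except = mapM; stage 2: the Horner fold over zip(vals, sizes)
def lin_index_py_alt (dims : List String) (sizes : List Int) (idx_maps : List (String × List (String × Int))) (coords : List (String × String)) : Option Int :=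
  (dims.mapM (linB_val idx_maps coords)).map
    (fun vals => (vals.zip sizes).foldl (fun idx vs => idx * vs.2 + vs.1) 0)

-- ===== PRECONDITION & SPEC =====
-- Pre_ excludes exactly the inputs where the Python A raises IndexError: sizes shorter than dims
-- (A reads sizes[len(dims)-1] on the first iteration, before any coords check).
def Pre_lin_index_py (dims : List String) (sizes : List Int) (idx_maps : List (String × List (String × Int))) (coords : List (String × String)) : Prop :=
  dims.length ≤ sizes.length
instance (dims : List String) (sizes : List Int) (idx_maps : List (String × List (String × Int))) (coords : List (String × String)) : Decidable (Pre_lin_index_py dims sizes idx_maps coords) := by unfold Pre_lin_index_py; infer_instance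

def pvWitness_lin_index_py : List String × List Int × (List (String × List (String × Int))) × (List (String × String)) :=
  (["geo", "time"], [3, 4], [("geo", [("FR", 1)]), ("time", [("2020", 2)])], [("geo", "FR"), ("time", "2020")])

def Spec_lin_index_py (dims : List String) (sizes : List Int) (idx_maps : List (String × List (String × Int))) (coords : List (String × String)) (out : Option Int) : Prop := out = lin_index_py_alt dims sizes idx_maps coords
instance (dims : List String) (sizes : List Int) (idx_maps : List (String × List (String × Int))) (coords : List (String × String)) (out : Option Int) : Decidable (Spec_lin_index_py dims sizes idx_maps coords out) := by unfold Spec_lin_index_py; infer_instance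

-- ===== CLAIM (what is proved, stated in full; the proofs are below) =====
def Claim_equal_lin_index_py : Prop := ∀ (dims : List String) (sizes : List Int) (idx_maps : List (String × List (String × Int))) (coords : List (String × String)), Dom_lin_index_py dims sizes idx_maps coords → Pre_lin_index_py dims sizes idx_maps coords → Spec_lin_index_py dims sizes idx_maps coords (lin_index_py dims sizes idx_maps coords)

-- ===== LEMMAS AND PROOFS =====

-- A's per-dim lookup chain (coords first, then idx_maps.get(d, {})) computes the same Option as linB_val
theorem linB_val_eq (idx_maps : List (String × List (String × Int))) (coords : List (String × String)) (d : String) :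
    linB_val idx_maps coords d
      = match (PySem.Dict.mk coords).get? d with
        | none => none
        | some code => (PySem.Dict.mk ((PySem.Dict.mk idx_maps).getD d [])).get? code := by
  unfold linB_val
  cases hm : (PySem.Dict.mk idx_maps).get? d with
  | none =>
    have : (PySem.Dict.mk idx_maps).getD d [] = [] := by
      simp [PySem.Dict.getD_eq_get?_getD, hm]
    rw [this]
    cases (PySem.Dict.mk coords).get? d <;> simp [PySem.Dict.get?]
  | some m =>
    have : (PySem.Dict.mk idx_maps).getD d [] = m := by
      simp [PySem.Dict.getD_eq_get?_getD, hm]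
    rw [this]
    cases (PySem.Dict.mk coords).get? d <;> simp

-- proof-only reference loop: A's traversal order over (dim, size) pairs, also carrying the final multiplier
def pvGoP2 (idx_maps : List (String × List (String × Int))) (coords : List (String × String)) : List (String × Int) → Int → Int → Option (Int × Int)
  | [], mul, idx => some (mul, idx)
  | (d, size) :: rest, mul, idx =>
    match linB_val idx_maps coords d with
    | none => none
    | some ival => pvGoP2 idx_maps coords rest (mul * size) (idx + ival * mul)

theorem linA_go_eq_goP2 (dims : List String) (sizes : List Int) (idx_maps : List (String × List (String × Int))) (coords : List (String × String)) (hlen : dims.length ≤ sizes.length) :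
    ∀ (tl : List String) (k : Nat), dims.reverse.drop k = tl → ∀ (mul idx : Int),
      linA_go dims sizes idx_maps coords (PySem.List.enumerate tl (k : Int)) mul idx
        = (pvGoP2 idx_maps coords (((dims.zip sizes).reverse).drop k) mul idx).map (·.2) := by
  intro tl
  induction tl with
  | nil =>
    intro k hk mul idx
    have hk' : dims.length ≤ k := by
      have h := List.drop_eq_nil_iff.mp hk
      simpa using h
    have hz : ((dims.zip sizes).reverse).drop k = [] := by
      apply List.drop_eq_nil_of_le
      rw [List.length_reverse, List.length_zip]
      omega
    simp [hz, PySem.List.enumerate_nil, linA_go, pvGoP2]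
  | cons d tl' ih =>
    intro k hk mul idx
    have hklt : k < dims.reverse.length := by
      by_contra h
      push Not at h
      rw [List.drop_eq_nil_of_le h] at hk
      simp at hk
    have hkn : k < dims.length := by simpa using hklt
    have hdrop := List.drop_eq_getElem_cons hklt
    rw [hdrop] at hk
    have hd : dims.reverse[k] = d := (List.cons_eq_cons.mp hk).1
    have htl : dims.reverse.drop (k + 1) = tl' := (List.cons_eq_cons.mp hk).2
    have hzlen : (dims.zip sizes).length = dims.length := by
      rw [List.length_zip]; omega
    have hzklt : k < ((dims.zip sizes).reverse).length := by
      rw [List.length_reverse, hzlen]; exact hkn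
    have hzdrop := List.drop_eq_getElem_cons hzklt
    have hidx : dims.length - 1 - k < dims.length := by omega
    have hidx' : dims.length - 1 - k < sizes.length := by omega
    have hzget : ((dims.zip sizes).reverse)[k] = (dims[dims.length - 1 - k], sizes[dims.length - 1 - k]) := by
      rw [List.getElem_reverse]
      simp [hzlen, List.getElem_zip]
    have hdget : dims[dims.length - 1 - k] = d := by
      rw [← hd, List.getElem_reverse]
    rw [PySem.List.enumerate_cons, hzdrop, hzget]
    have hcast : ((dims.length : Int) - 1 - (k : Int)) = ((dims.length - 1 - k : Nat) : Int) := by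
      omega
    show (match PySem.List.pyGet? dims ((dims.length : Int) - 1 - (k : Int)) with
      | none => none
      | some d_real =>
        match PySem.List.pyGet? sizes ((dims.length : Int) - 1 - (k : Int)) with
        | none => none
        | some size =>
          match (PySem.Dict.mk coords).get? d_real with
          | none => none
          | some code =>
            match (PySem.Dict.mk ((PySem.Dict.mk idx_maps).getD d_real [])).get? code with
            | none => none
            | some ival => linA_go dims sizes idx_maps coords (PySem.List.enumerate tl' ((k : Int) + 1)) (mul * size) (idx + ival * mul)) = _
    rw [hcast]
    rw [PySem.List.pyGet?_natCast dims, PySem.List.pyGet?_natCast sizes,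
        List.getElem?_eq_getElem hidx, List.getElem?_eq_getElem hidx', hdget]
    dsimp only
    have hk1 : ((k : Int) + 1) = ((k + 1 : Nat) : Int) := by push_cast; ring
    cases hC : (PySem.Dict.mk coords).get? d with
    | none => simp [pvGoP2, linB_val_eq, hC]
    | some code =>
      dsimp only
      cases hD : (PySem.Dict.mk ((PySem.Dict.mk idx_maps).getD d [])).get? code with
      | none => simp [pvGoP2, linB_val_eq, hC, hD]
      | some ival =>
        dsimp only
        rw [hk1, ih (k + 1) htl]
        simp [pvGoP2, linB_val_eq, hC, hD]

theorem pvGoP2_append (idx_maps : List (String × List (String × Int))) (coords : List (String × String)) :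
    ∀ (l : List (String × Int)) (d : String) (s : Int) (mul idx : Int),
      pvGoP2 idx_maps coords (l ++ [(d, s)]) mul idx
        = (pvGoP2 idx_maps coords l mul idx).bind (fun mi =>
            match linB_val idx_maps coords d with
            | none => none
            | some ival => some (mi.1 * s, mi.2 + ival * mi.1)) := by
  intro l
  induction l with
  | nil =>
    intro d s mul idx
    simp only [List.nil_append, pvGoP2, Option.bind_some]
  | cons p rest ih =>
    intro d s mul idx
    obtain ⟨pd, ps⟩ := p
    simp only [List.cons_append, pvGoP2]
    cases hC : linB_val idx_maps coords pd with
    | none => rfl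
    | some ival =>
      dsimp only
      exact ih d s (mul * ps) (idx + ival * mul)

-- proof-only forward Horner loop, the meeting point of the two characterizations
def pvGoF (idx_maps : List (String × List (String × Int))) (coords : List (String × String)) : List (String × Int) → Int → Option Int
  | [], idx => some idx
  | (d, size) :: rest, idx =>
    match linB_val idx_maps coords d with
    | none => none
    | some ival => pvGoF idx_maps coords rest (idx * size + ival)

theorem pvGoF_eq_goP2 (idx_maps : List (String × List (String × Int))) (coords : List (String × String)) :
    ∀ (l : List (String × Int)) (acc : Int),
      pvGoF idx_maps coords l acc
        = (pvGoP2 idx_maps coords l.reverse 1 0).map (fun p => acc * p.1 + p.2) := by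
  intro l
  induction l with
  | nil => intro acc; simp [pvGoF, pvGoP2]
  | cons p rest ih =>
    intro acc
    obtain ⟨d, s⟩ := p
    simp only [pvGoF, List.reverse_cons]
    rw [pvGoP2_append]
    cases hC : linB_val idx_maps coords d with
    | none =>
      cases pvGoP2 idx_maps coords rest.reverse 1 0 with
      | none => simp
      | some mi => simp
    | some ival =>
      dsimp only
      rw [ih (acc * s + ival)]
      cases pvGoP2 idx_maps coords rest.reverse 1 0 with
      | none => simp
      | some mi =>
        simp [hC]
        ring

-- B's staged mapM + foldl computes the forward Horner loop over dims.zip sizes (needs len dims ≤ len sizes)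
theorem linB_eq_goF (idx_maps : List (String × List (String × Int))) (coords : List (String × String)) :
    ∀ (ds : List String) (ss : List Int), ds.length ≤ ss.length → ∀ (acc : Int),
      (ds.mapM (linB_val idx_maps coords)).map
          (fun vals => (vals.zip ss).foldl (fun idx vs => idx * vs.2 + vs.1) acc)
        = pvGoF idx_maps coords (ds.zip ss) acc := by
  intro ds
  induction ds with
  | nil => intro ss _ acc; simp [pvGoF]
  | cons d ds' ih =>
    intro ss hlen acc
    cases ss with
    | nil => simp at hlen
    | cons s ss' =>
      have hlen' : ds'.length ≤ ss'.length := by simpa using hlen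
      rw [List.mapM_cons]
      cases hC : linB_val idx_maps coords d with
      | none => simp [hC, List.zip_cons_cons, pvGoF]
      | some ival =>
        cases hM : ds'.mapM (linB_val idx_maps coords) with
        | none =>
          have := ih ss' hlen' (acc * s + ival)
          rw [hM] at this
          simp [hC, hM, List.zip_cons_cons, pvGoF, ← this]
        | some vals =>
          have := ih ss' hlen' (acc * s + ival)
          rw [hM] at this
          simp only [hC, hM, Option.bind_some, Option.map_some, Option.pure_def,
            List.zip_cons_cons, List.foldl_cons, pvGoF]
          simp only [Option.map_some] at this
          simpa using this

-- ===== VERDICT (by name: the statement is the Claim_ definition above) =====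
theorem lin_index_py_spec : Claim_equal_lin_index_py := by
  intro dims sizes idx_maps coords _hdom hpre
  unfold Spec_lin_index_py lin_index_py lin_index_py_alt
  have hA := linA_go_eq_goP2 dims sizes idx_maps coords hpre dims.reverse 0 rfl 1 0
  simp only [Nat.cast_zero, List.drop_zero] at hA
  rw [hA, linB_eq_goF idx_maps coords dims sizes hpre 0, pvGoF_eq_goP2]
  cases pvGoP2 idx_maps coords ((dims.zip sizes).reverse) 1 0 with
  | none => simp
  | some mi => simp
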